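-- pv_equiv track=rewrite | github.com/Tuan-H-Nguyen/Machine-Learning-Degree-Pi-Orbital | poly_rings/DPO.py | reference_segment
-- ===== SOURCE A (Python) =====
-- def reference_segment(segment,thiophene=False):
--     """
--     Get the contribution to the DPO value of the
--     reference segment.
--
--     Args:
--     + segment (Segment): reference segment
--     + thiophene (bool, optional): If thiophene in the
--         the segment. Defaults to False.
--
--     Returns:
--         String: polynomials contribution of the
--             reference segment.
--     """
--     n = len(segment) - 1
--     a = 0
--     for i in range(n):
--         a += i
--     if thiophene:
--         return ["{} - {}*a - af".format(n,a)]
--     else: return ["{} - {}*a".format(n,a)]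
-- ===== SOURCE B (Python) =====
-- def reference_segment(segment, thiophene=False):
--     n = len(segment) - 1
--     m = max(n, 0)
--     base = "{} - {}*a".format(n, m * (m - 1) // 2)
--     return [base + " - af" if thiophene else base]
-- ===== Notes on version B (the rewrite author's own statement) =====
-- stated objective: simpler
-- what changed: Replaced the accumulation loop over range(n) with the closed-form triangular number max(n,0)*(max(n,0)-1)//2, and replaced the two formatting branches with one base string plus a conditional ' - af' suffix.
import Mathlib
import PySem

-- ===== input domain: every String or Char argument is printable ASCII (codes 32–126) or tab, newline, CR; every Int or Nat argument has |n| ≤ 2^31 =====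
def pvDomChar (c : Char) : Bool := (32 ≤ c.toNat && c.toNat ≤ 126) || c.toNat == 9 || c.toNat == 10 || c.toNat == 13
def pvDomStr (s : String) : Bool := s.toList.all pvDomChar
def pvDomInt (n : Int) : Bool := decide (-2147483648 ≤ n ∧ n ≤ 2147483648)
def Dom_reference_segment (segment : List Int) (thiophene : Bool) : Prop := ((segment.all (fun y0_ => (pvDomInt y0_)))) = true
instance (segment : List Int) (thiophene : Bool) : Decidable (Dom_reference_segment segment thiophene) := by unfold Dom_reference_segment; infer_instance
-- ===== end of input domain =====

-- B replaces A's accumulation loop with the closed-form triangular number (clamped at 0)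
-- and builds one base string with a conditional suffix instead of two format branches; objective: simpler.
-- ===== PORT A =====
def reference_segment (segment : List Int) (thiophene : Bool) : List String :=
  let n : Int := PySem.List.len segment - 1
  let a : Int := (PySem.List.pyRange 0 n 1).foldl (fun acc i => acc + i) 0
  if thiophene then [PySem.Int.toStr n ++ " - " ++ PySem.Int.toStr a ++ "*a - af"]
  else [PySem.Int.toStr n ++ " - " ++ PySem.Int.toStr a ++ "*a"]

-- ===== PORT B =====
def reference_segment_alt (segment : List Int) (thiophene : Bool) : List String :=
  let n : Int := PySem.List.len segment - 1
  let m : Int := max n 0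
  let base : String := PySem.Int.toStr n ++ " - " ++ PySem.Int.toStr (PySem.Int.floordiv (m * (m - 1)) 2) ++ "*a"
  [if thiophene then base ++ " - af" else base]

-- ===== PRECONDITION & SPEC =====
def Spec_reference_segment (segment : List Int) (thiophene : Bool) (out : List String) : Prop := out = reference_segment_alt segment thiophene
instance (segment : List Int) (thiophene : Bool) (out : List String) : Decidable (Spec_reference_segment segment thiophene out) := by unfold Spec_reference_segment; infer_instance

-- ===== CLAIM (what is proved, stated in full; the proofs are below) =====
def Claim_equal_reference_segment : Prop := ∀ (segment : List Int) (thiophene : Bool), Dom_reference_segment segment thiophene → Spec_reference_segment segment thiophene (reference_segment segment thiophene)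

-- ===== LEMMAS AND PROOFS =====

-- sum of 0..m-1 doubled
lemma two_mul_sum_range (m : Nat) :
    2 * (List.map (fun k : Nat => (k : Int)) (List.range m)).sum
      = (m : Int) * ((m : Int) - 1) := by
  induction m with
  | zero => simp
  | succ m ih =>
    rw [List.range_succ, List.map_append, List.sum_append]
    simp only [List.map_cons, List.map_nil, List.sum_cons, List.sum_nil]
    push_cast
    push_cast at ih
    nlinarith [ih]

lemma loop_eq_closed (n : Int) :
    (PySem.List.pyRange 0 n 1).foldl (fun acc i => acc + i) 0
      = PySem.Int.floordiv (max n 0 * (max n 0 - 1)) 2 := by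
  have hsum : (PySem.List.pyRange 0 n 1).foldl (fun acc i => acc + i) 0
      = 0 + ((PySem.List.pyRange 0 n 1).map (fun i => i)).sum :=
    PySem.List.foldl_add _ (fun i => i) 0
  rw [hsum, zero_add]
  by_cases h : n > 0
  · have hmax : max n 0 = n := max_eq_left (le_of_lt h)
    rw [hmax, PySem.List.pyRange_one]
    have hm : ((n.toNat : Int)) = n := Int.toNat_of_nonneg (le_of_lt h)
    have h2 : 2 * (List.map (fun k : Nat => (k : Int)) (List.range n.toNat)).sum
        = n * (n - 1) := by rw [two_mul_sum_range, hm]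
    have hfd : PySem.Int.floordiv (n * (n - 1)) 2
        = (List.map (fun k : Nat => (k : Int)) (List.range n.toNat)).sum := by
      rw [← h2]
      simp only [PySem.Int.floordiv]
      rw [Int.mul_fdiv_cancel_left _ (by norm_num)]
    rw [hfd, List.map_map]
    simp [Function.comp_def]
  · have hmax : max n 0 = 0 := max_eq_right (by omega)
    rw [hmax, PySem.List.pyRange_one_eq_nil (by omega)]
    simp [PySem.Int.floordiv]

-- ===== VERDICT =====
theorem reference_segment_spec : Claim_equal_reference_segment := by
  intro segment thiophene _
  unfold Spec_reference_segment reference_segment reference_segment_alt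
  simp only [loop_eq_closed]
  cases thiophene <;> simp [String.append_assoc]
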